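-- pv_equiv track=rewrite | github.com/hoangkimpt2022/remind_service | remind_service.py | find_prop_key
-- ===== SOURCE A (Python) =====
-- def find_prop_key(props: dict, key_like: str):
--     if not props or not key_like:
--         return None
--     if key_like in props:
--         return key_like
--     low = key_like.lower()
--     for k in props.keys():
--         if k.lower() == low:
--             return k
--     for k in props.keys():
--         if low in k.lower():
--             return k
--     return None
-- ===== SOURCE B (Python) =====
-- def find_prop_key(props: dict, key_like: str):
--     if not props or not key_like:
--         return None
--     if key_like in props:
--         return key_like
--     low = key_like.lower()
--     fallback = None
--     for k in props.keys():
--         kl = k.lower()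
--         if kl == low:
--             return k
--         if fallback is None and low in kl:
--             fallback = k
--     return fallback
-- ===== Notes on version B (the rewrite author's own statement) =====
-- stated objective: simpler
-- what changed: The two sequential scans over the keys (case-insensitive exact, then substring) are merged into one pass that returns an exact hit immediately and records the first substring hit in a fallback variable, and each key is lowercased once instead of twice.
import Mathlib
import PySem

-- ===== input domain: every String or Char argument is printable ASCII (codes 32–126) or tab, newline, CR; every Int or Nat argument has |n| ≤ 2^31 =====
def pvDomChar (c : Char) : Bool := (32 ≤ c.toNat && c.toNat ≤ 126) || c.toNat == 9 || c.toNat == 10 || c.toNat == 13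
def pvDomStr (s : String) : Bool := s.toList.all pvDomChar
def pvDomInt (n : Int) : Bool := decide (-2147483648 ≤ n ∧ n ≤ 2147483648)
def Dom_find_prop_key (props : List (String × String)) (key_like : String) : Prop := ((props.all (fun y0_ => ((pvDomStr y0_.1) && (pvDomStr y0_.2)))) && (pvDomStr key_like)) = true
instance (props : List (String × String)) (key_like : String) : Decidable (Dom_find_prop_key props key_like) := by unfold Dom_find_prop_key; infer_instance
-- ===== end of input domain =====

-- B merges A's two sequential key scans into one pass with a fallback variable (simpler, single traversal); return values proved equal everywhere.

-- ===== PORT A =====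
-- first `for` loop of A: first key whose lowercase equals low
def pvALoop1 (ks : List String) (low : String) : Option String :=
  match ks with
  | [] => none
  | k :: rest => if PySem.Str.lower k == low then some k else pvALoop1 rest low

-- second `for` loop of A: first key whose lowercase contains low
def pvALoop2 (ks : List String) (low : String) : Option String :=
  match ks with
  | [] => none
  | k :: rest => if PySem.Str.isIn low (PySem.Str.lower k) then some k else pvALoop2 rest low

def find_prop_key (props : List (String × String)) (key_like : String) : Option String :=
  let d := PySem.Dict.ofList props
  if d.size == 0 || key_like == "" then none
  else if d.contains key_like then some key_like
  else
    let low := PySem.Str.lower key_like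
    match pvALoop1 d.keys low with
    | some k => some k
    | none => pvALoop2 d.keys low

-- ===== PORT B =====
-- B's single pass: return an exact (case-insensitive) hit at once, remember the first substring hit
def pvBLoop (ks : List String) (low : String) (fallback : Option String) : Option String :=
  match ks with
  | [] => fallback
  | k :: rest =>
      let kl := PySem.Str.lower k
      if kl == low then some k
      else pvBLoop rest low
        (if fallback.isNone && PySem.Str.isIn low kl then some k else fallback)

def find_prop_key_alt (props : List (String × String)) (key_like : String) : Option String :=
  let d := PySem.Dict.ofList props
  if d.size == 0 || key_like == "" then none
  else if d.contains key_like then some key_like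
  else pvBLoop d.keys (PySem.Str.lower key_like) none

-- ===== PRECONDITION & SPEC =====
def Spec_find_prop_key (props : List (String × String)) (key_like : String) (out : Option String) : Prop := out = find_prop_key_alt props key_like
instance (props : List (String × String)) (key_like : String) (out : Option String) : Decidable (Spec_find_prop_key props key_like out) := by unfold Spec_find_prop_key; infer_instance

-- ===== CLAIM (what is proved, stated in full; the proofs are below) =====
def Claim_equal_find_prop_key : Prop := ∀ (props : List (String × String)) (key_like : String), Dom_find_prop_key props key_like → Spec_find_prop_key props key_like (find_prop_key props key_like)

-- ===== LEMMAS AND PROOFS =====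

-- the single pass equals: exact-scan result, else the recorded fallback, else the substring-scan result
theorem pvBLoop_eq (ks : List String) (low : String) (fb : Option String) :
    pvBLoop ks low fb =
      match pvALoop1 ks low with
      | some k => some k
      | none => match fb with
                | some x => some x
                | none => pvALoop2 ks low := by
  induction ks generalizing fb with
  | nil => cases fb <;> simp [pvBLoop, pvALoop1, pvALoop2]
  | cons k rest ih =>
      simp only [pvBLoop, pvALoop1, pvALoop2]
      by_cases hx : PySem.Str.lower k == low
      · simp [hx]
      · simp only [hx, ih]
        cases fb with
        | some x => simp
        | none =>
            cases h1 : pvALoop1 rest low <;>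
              by_cases hs : PySem.Str.isIn low (PySem.Str.lower k) = true <;>
                simp only [PySem.Str.isIn, PySem.Str.toList_lower] at hs <;> simp [hs]

-- ===== VERDICT (by name: the statement is the Claim_ definition above) =====
theorem find_prop_key_spec : Claim_equal_find_prop_key := by
  intro props key_like _
  unfold Spec_find_prop_key find_prop_key find_prop_key_alt
  simp only [pvBLoop_eq]
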